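-- pv_equiv track=rewrite | github.com/Deathoendo/hack-python-2 | h-1/h1.py | fn_hack_1
-- ===== SOURCE A (Python) =====
-- def fn_hack_1(result):
--     i = 1
--     resultado = ""
--     for c in result:
--         if i == 2:
--             if c == 'a' or c == 'e' or c == 'i' or c =='o' or c == 'u' or c == 'A' or c == 'E' or c == 'I' or c =='O' or c == 'U':
--                 c = c.upper()
--             i = -1
--         resultado = resultado + c
--         i += 1
--
--     return resultado
-- ===== SOURCE B (Python) =====
-- VOWELS = frozenset('aeiouAEIOU')
--
-- def fn_hack_1(result):
--     chars = list(result)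
--     for i in range(1, len(chars), 3):
--         if chars[i] in VOWELS:
--             chars[i] = chars[i].upper()
--     return ''.join(chars)
-- ===== Notes on version B (the rewrite author's own statement) =====
-- stated objective: faster
-- what changed: Instead of A's per-character scan with a resetting counter and quadratic-prone string concatenation, B converts to a mutable list once, visits only every third index via range(1, len, 3) uppercasing vowels in place, and joins.
import Mathlib
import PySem

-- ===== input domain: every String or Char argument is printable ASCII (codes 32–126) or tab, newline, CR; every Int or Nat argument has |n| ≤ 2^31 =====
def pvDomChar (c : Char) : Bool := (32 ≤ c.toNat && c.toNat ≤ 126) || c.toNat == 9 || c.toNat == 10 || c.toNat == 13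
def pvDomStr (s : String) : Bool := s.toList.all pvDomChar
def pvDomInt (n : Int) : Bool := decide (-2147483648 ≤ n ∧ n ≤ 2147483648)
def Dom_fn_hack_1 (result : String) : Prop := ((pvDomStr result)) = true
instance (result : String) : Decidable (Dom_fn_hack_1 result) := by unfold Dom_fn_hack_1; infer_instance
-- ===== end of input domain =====

-- B drops A's character scan with a resetting counter: it turns the string into a
-- mutable list once, visits only every third index via range(1, len, 3), uppercases
-- vowels in place, and joins (objective: faster, measured).

-- ===== PORT A =====
-- A's vowel test: the literal chain of equality comparisons
def pvVowelA (c : Char) : Bool :=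
  c == 'a' || c == 'e' || c == 'i' || c == 'o' || c == 'u' ||
  c == 'A' || c == 'E' || c == 'I' || c == 'O' || c == 'U'

-- one iteration of A's for-loop body, state = (i, resultado)
def pvStepA (st : Int × List Char) (c : Char) : Int × List Char :=
  let p : Char × Int :=
    if st.1 = 2 then
      ((if pvVowelA c then PySem.Chars.upperChar c else c), -1)
    else (c, st.1)
  (p.2 + 1, st.2 ++ [p.1])

def fn_hack_1 (result : String) : String :=
  String.ofList (result.toList.foldl pvStepA (1, [])).2

-- ===== PORT B =====
-- B's VOWELS set (a frozenset of distinct chars, as a PySem-style distinct list)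
def pvVowelsB : List Char := ['a','e','i','o','u','A','E','I','O','U']

-- one iteration of B's index loop: 'if chars[i] in VOWELS: chars[i] = chars[i].upper()'.
-- chars[i] is pyGet?; indices drawn from range(1, len, 3) are nonnegative and in range,
-- so the assignment chars[i] = … is exactly List.set i.toNat (the none branch is unreachable).
def pvStepB (cs : List Char) (i : Int) : List Char :=
  match PySem.List.pyGet? cs i with
  | some c =>
      if pvVowelsB.contains c then cs.set i.toNat (PySem.Chars.upperChar c) else cs
  | none => cs

def fn_hack_1_alt (result : String) : String :=
  String.ofList ((PySem.List.pyRange 1 (result.toList.length : Int) 3).foldl pvStepB result.toList)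

-- ===== PRECONDITION & SPEC =====
def Spec_fn_hack_1 (result : String) (out : String) : Prop := out = fn_hack_1_alt result
instance (result : String) (out : String) : Decidable (Spec_fn_hack_1 result out) := by unfold Spec_fn_hack_1; infer_instance

-- ===== CLAIM (what is proved, stated in full; the proofs are below) =====
def Claim_equal_fn_hack_1 : Prop := ∀ (result : String), Dom_fn_hack_1 result → Spec_fn_hack_1 result (fn_hack_1 result)

-- ===== LEMMAS AND PROOFS =====

-- proof-side per-position rule both programs implement
def pvRule (p : Int × Char) : Char :=
  if PySem.Int.mod p.1 3 == 1 && pvVowelA p.2 then PySem.Chars.upperChar p.2 else p.2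

-- the branchless form of B's in-place fix
def pvFix (c : Char) : Char :=
  if pvVowelsB.contains c then PySem.Chars.upperChar c else c

lemma pvVowel_eq (c : Char) : pvVowelsB.contains c = pvVowelA c := by
  rcases Bool.eq_false_or_eq_true (pvVowelA c) with h | h <;> rw [h] <;>
    simp_all [pvVowelA, pvVowelsB, List.contains_eq_mem] <;> tauto

lemma pvRule_eq (j : Nat) (c : Char) :
    pvRule ((j : Int), c)
      = if ((j : Int) + 1) % 3 = 2 then
          (if pvVowelA c then PySem.Chars.upperChar c else c)
        else c := by
  have h13 : ((j : Int) % 3 = 1) ↔ (((j : Int) + 1) % 3 = 2) := by omega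
  have hm : PySem.Int.mod (j : Int) 3 = (j : Int) % 3 :=
    PySem.Int.mod_eq_emod_of_pos (by norm_num)
  by_cases h : ((j : Int) + 1) % 3 = 2
  · simp [pvRule, h13.mpr h, h]
  · have : ¬ ((j : Int) % 3 = 1) := fun hx => h (h13.mp hx)
    simp [pvRule, this, h]

-- A's loop computes the enumerate-map of pvRule
lemma pvLoopA (l : List Char) (j : Nat) (acc : List Char) :
    (l.foldl pvStepA (((j : Int) + 1) % 3, acc)).2
      = acc ++ (PySem.List.enumerate l (j : Int)).map pvRule := by
  induction l generalizing j acc with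
  | nil => simp [PySem.List.enumerate_nil]
  | cons x xs ih =>
    rw [PySem.List.enumerate_cons]
    by_cases h : ((j : Int) + 1) % 3 = 2
    · have hstep : pvStepA (((j : Int) + 1) % 3, acc) x
          = ((((j + 1 : Nat) : Int) + 1) % 3,
             acc ++ [if pvVowelA x then PySem.Chars.upperChar x else x]) := by
        simp only [pvStepA]
        rw [if_pos h]
        simp only [Prod.mk.injEq]
        exact ⟨by push_cast; omega, trivial⟩
      rw [List.foldl_cons, hstep, ih (j + 1)]
      simp [pvRule_eq, h]
    · have hstep : pvStepA (((j : Int) + 1) % 3, acc) x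
          = ((((j + 1 : Nat) : Int) + 1) % 3, acc ++ [x]) := by
        simp only [pvStepA]
        rw [if_neg h]
        simp only [Prod.mk.injEq]
        exact ⟨by push_cast; omega, trivial⟩
      rw [List.foldl_cons, hstep, ih (j + 1)]
      simp [pvRule_eq, h]

lemma pvStepB_get_self (cs : List Char) (i : Int) (h0 : 0 ≤ i) :
    (pvStepB cs i)[i.toNat]? = (cs[i.toNat]?).map pvFix := by
  have hg : PySem.List.pyGet? cs i = cs[i.toNat]? := PySem.List.pyGet?_of_nonneg _ h0
  cases hc : cs[i.toNat]? with
  | none => simp [pvStepB, hg, hc]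
  | some c =>
    have hlt : i.toNat < cs.length := by
      by_contra hge
      simp [List.getElem?_eq_none (by omega : cs.length ≤ i.toNat)] at hc
    by_cases hv : c ∈ pvVowelsB
    · simp only [pvStepB, hg, hc, hv, List.contains_eq_mem, decide_true, if_true]
      rw [List.getElem?_set_self', hc]
      simp [pvFix, hv]
    · simp only [pvStepB, hg, hc, hv, List.contains_eq_mem, decide_false]
      simp [hc, pvFix, hv]

lemma pvStepB_get_ne (cs : List Char) (i : Int) (k : Nat) (h0 : 0 ≤ i)
    (hne : (k : Int) ≠ i) : (pvStepB cs i)[k]? = cs[k]? := by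
  have hg : PySem.List.pyGet? cs i = cs[i.toNat]? := PySem.List.pyGet?_of_nonneg _ h0
  have hk : i.toNat ≠ k := by omega
  cases hc : cs[i.toNat]? with
  | none => simp [pvStepB, hg, hc]
  | some c =>
    by_cases hv : c ∈ pvVowelsB <;>
      simp [pvStepB, hg, hc, hv, List.getElem?_set_ne hk]

-- folding B's step over a sorted list of nonnegative indices fixes exactly those positions
lemma pvFoldB_get (ids : List Int) (hs : ids.Pairwise (· < ·))
    (hnn : ∀ i ∈ ids, 0 ≤ i) (cs : List Char) (k : Nat) :
    (ids.foldl pvStepB cs)[k]?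
      = if (k : Int) ∈ ids then (cs[k]?).map pvFix else cs[k]? := by
  induction ids generalizing cs with
  | nil => simp
  | cons i ids ih =>
    have h0 : 0 ≤ i := hnn i (by simp)
    have hlt : ∀ j ∈ ids, i < j := (List.pairwise_cons.mp hs).1
    have ihk := ih (List.pairwise_cons.mp hs).2 (fun j hj => hnn j (by simp [hj]))
      (pvStepB cs i)
    rw [List.foldl_cons, ihk]
    by_cases hk : (k : Int) = i
    · have hnot : (k : Int) ∉ ids := fun hmem => by
        have := hlt _ hmem; omega
      have hki : i.toNat = k := by omega
      rw [if_neg hnot, if_pos (show (k : Int) ∈ i :: ids by simp [hk])]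
      rw [← hki]
      exact pvStepB_get_self cs i h0
    · rw [pvStepB_get_ne cs i k h0 hk]
      simp [List.mem_cons, hk]

lemma pvRange3_pairwise (n : Int) : (PySem.List.pyRange 1 n 3).Pairwise (· < ·) := by
  rw [PySem.List.pyRange_of_pos 1 n (by norm_num)]
  exact List.Pairwise.map _ (fun a b h => by omega) List.pairwise_lt_range

-- B's fold equals the enumerate-map of pvRule
lemma pvFoldB_eq (cs : List Char) :
    (PySem.List.pyRange 1 (cs.length : Int) 3).foldl pvStepB cs
      = (PySem.List.enumerate cs 0).map pvRule := by
  apply List.ext_getElem?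
  intro k
  have hnn : ∀ i ∈ PySem.List.pyRange 1 (cs.length : Int) 3, 0 ≤ i := by
    intro i hi
    have := (PySem.List.mem_pyRange_iff_of_pos (by norm_num : (0:Int) < 3) i).mp hi
    omega
  rw [pvFoldB_get _ (pvRange3_pairwise _) hnn cs k]
  rw [List.getElem?_map, PySem.List.getElem?_enumerate]
  have hmem : (k : Int) ∈ PySem.List.pyRange 1 (cs.length : Int) 3
      ↔ 1 ≤ (k : Int) ∧ (k : Int) < (cs.length : Int) ∧ (3 : Int) ∣ (k : Int) - 1 :=
    PySem.List.mem_pyRange_iff_of_pos (by norm_num) _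
  cases hc : cs[k]? with
  | none =>
    by_cases hm : (k : Int) ∈ PySem.List.pyRange 1 (cs.length : Int) 3
    · rw [if_pos hm]; simp
    · rw [if_neg hm]; simp
  | some c =>
    have hk : k < cs.length := by
      by_contra h
      simp [List.getElem?_eq_none (by omega : cs.length ≤ k)] at hc
    by_cases h3 : (k : Int) % 3 = 1
    · rw [if_pos (hmem.mpr ⟨by omega, by omega, by omega⟩)]
      simp only [Option.map_some, Option.some.injEq, pvRule, pvFix]
      rw [pvVowel_eq, zero_add, PySem.Int.mod_eq_emod_of_pos (by norm_num), h3]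
      by_cases hv : pvVowelA c = true <;> simp [hv]
    · rw [if_neg (fun hm => by have := (hmem.mp hm).2.2; omega)]
      simp only [Option.map_some, Option.some.injEq, pvRule]
      rw [zero_add, PySem.Int.mod_eq_emod_of_pos (by norm_num)]
      simp [h3]

-- ===== VERDICT (by name: the statement is the Claim_ definition above) =====
theorem fn_hack_1_spec : Claim_equal_fn_hack_1 := by
  intro result _
  unfold Spec_fn_hack_1 fn_hack_1 fn_hack_1_alt
  have hA := pvLoopA result.toList 0 []
  norm_num at hA
  rw [hA, pvFoldB_eq]
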